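-- pv_equiv track=rewrite | github.com/gcastellazzi/Cloud2FEM-portable | Mesh_functions.py | connectivity_check_consitency
-- ===== SOURCE A (Python) =====
-- def connectivity_check_consitency(connectivity_matrix):
--     result = []
--     row_sets = [set(row) for row in connectivity_matrix]
--
--     for i in range(len(connectivity_matrix)):
--         shared_count = 0
--         for j in range(i + 1, len(connectivity_matrix)):
--             common_elements = row_sets[i] & row_sets[j]
--             if len(common_elements) >= 3:
--                 shared_count += 1
--         if shared_count < 3:
--             result.append(i)
--
--     return result
-- ===== SOURCE B (Python) =====
-- def connectivity_check_consitency(connectivity_matrix):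
--     n = len(connectivity_matrix)
--     row_sets = [set(row) for row in connectivity_matrix]
--     # inverted index: node -> rows containing it (increasing order)
--     node_rows = {}
--     for i, rs in enumerate(row_sets):
--         for v in rs:
--             node_rows.setdefault(v, []).append(i)
--     result = []
--     for i in range(n):
--         cnt = {}
--         for v in row_sets[i]:
--             for j in node_rows[v]:
--                 if j > i:
--                     cnt[j] = cnt.get(j, 0) + 1
--         shared = sum(1 for c in cnt.values() if c >= 3)
--         if shared < 3:
--             result.append(i)
--     return result
-- ===== Notes on version B (the rewrite author's own statement) =====
-- stated objective: faster
-- what changed: Replaces the all-pairs set-intersection scan with an inverted index node->rows, so each row only counts shared elements against rows it actually shares a node with.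
import Mathlib
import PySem

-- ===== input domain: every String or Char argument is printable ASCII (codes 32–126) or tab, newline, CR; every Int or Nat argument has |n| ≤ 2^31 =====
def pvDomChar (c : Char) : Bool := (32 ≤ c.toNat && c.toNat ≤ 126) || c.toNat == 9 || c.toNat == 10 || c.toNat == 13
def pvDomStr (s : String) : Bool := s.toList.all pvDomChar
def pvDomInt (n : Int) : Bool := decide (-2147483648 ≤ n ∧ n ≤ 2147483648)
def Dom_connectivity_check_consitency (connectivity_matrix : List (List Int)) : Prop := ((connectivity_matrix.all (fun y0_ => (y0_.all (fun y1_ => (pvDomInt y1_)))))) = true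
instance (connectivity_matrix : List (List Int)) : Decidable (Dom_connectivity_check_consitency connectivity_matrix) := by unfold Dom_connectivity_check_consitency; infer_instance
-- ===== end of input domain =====

-- B replaces A's all-pairs set-intersection scan by an inverted index node -> rows; measured faster on the generated inputs.

-- ===== PORT A =====
def connectivity_check_consitency (connectivity_matrix : List (List Int)) : List Int :=
  let row_sets : List (PySem.Set Int) := connectivity_matrix.map (fun row => PySem.Set.ofList row)
  (PySem.List.pyRange 0 (PySem.List.len connectivity_matrix)).foldl
    (fun result i =>
      let shared_count : Int :=
        (PySem.List.pyRange (i + 1) (PySem.List.len connectivity_matrix)).foldl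
          (fun sc j =>
            if 3 ≤ PySem.Set.len (PySem.Set.inter (PySem.List.pyGetD row_sets i [])
                (PySem.List.pyGetD row_sets j [])) then sc + 1 else sc) 0
      if shared_count < 3 then result ++ [i] else result) []

-- ===== PORT B =====
def connectivity_check_consitency_alt (connectivity_matrix : List (List Int)) : List Int :=
  let row_sets : List (PySem.Set Int) := connectivity_matrix.map (fun row => PySem.Set.ofList row)
  -- node_rows.setdefault(v, []).append(i)  ==  node_rows[v] = node_rows.get(v, []) + [i]
  let node_rows : PySem.Dict Int (List Int) :=
    (PySem.List.enumerate row_sets).foldl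
      (fun d p => p.2.foldl (fun d v => d.modify v [] (fun l => l ++ [p.1])) d) PySem.Dict.empty
  (PySem.List.pyRange 0 (PySem.List.len connectivity_matrix)).foldl
    (fun result i =>
      let cnt : PySem.Dict Int Int :=
        (PySem.List.pyGetD row_sets i []).foldl
          (fun c v =>
            (node_rows.getD v []).foldl
              (fun c j => if i < j then c.modify j 0 (fun x => x + 1) else c) c)
          PySem.Dict.empty
      let shared : Int := (cnt.values.map (fun c => if 3 ≤ c then (1 : Int) else 0)).sum
      if shared < 3 then result ++ [i] else result) []

-- ===== PRECONDITION & SPEC =====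
def Spec_connectivity_check_consitency (connectivity_matrix : List (List Int)) (out : List Int) : Prop := out = connectivity_check_consitency_alt connectivity_matrix
instance (connectivity_matrix : List (List Int)) (out : List Int) : Decidable (Spec_connectivity_check_consitency connectivity_matrix out) := by unfold Spec_connectivity_check_consitency; infer_instance

-- ===== CLAIM (what is proved, stated in full; the proofs are below) =====
def Claim_equal_connectivity_check_consitency : Prop := ∀ (connectivity_matrix : List (List Int)), Dom_connectivity_check_consitency connectivity_matrix → Spec_connectivity_check_consitency connectivity_matrix (connectivity_check_consitency connectivity_matrix)

-- ===== LEMMAS AND PROOFS =====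

-- abbreviations used only by the proofs
def pvRS (m : List (List Int)) : List (PySem.Set Int) := m.map (fun row => PySem.Set.ofList row)

def pvNodeRows (m : List (List Int)) : PySem.Dict Int (List Int) :=
  (PySem.List.enumerate (pvRS m)).foldl
    (fun d p => p.2.foldl (fun d v => d.modify v [] (fun l => l ++ [p.1])) d) PySem.Dict.empty

def pvL (m : List (List Int)) (i : Int) : List Int :=
  (PySem.List.pyGetD (pvRS m) i []).flatMap
    (fun v => ((pvNodeRows m).getD v []).filter (fun j => decide (i < j)))

-- a nested fold over g a is a fold over the flatMap
theorem foldl_foldl_flatMap {α β δ : Type} (f : δ → β → δ) (g : α → List β) (l : List α) (d : δ) :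
    l.foldl (fun d a => (g a).foldl f d) d = (l.flatMap g).foldl f d := by
  induction l generalizing d with
  | nil => rfl
  | cons a t ih => simp only [List.foldl_cons, List.flatMap_cons, List.foldl_append, ih]

theorem count_filter_eq {α : Type} [BEq α] [LawfulBEq α] (l : List α) (q : α → Bool) (j : α) :
    (l.filter q).count j = if q j = true then l.count j else 0 := by
  by_cases h : q j = true
  · simp [h, List.count_filter h]
  · rw [if_neg h, List.count_eq_zero]
    intro hm
    exact h (List.of_mem_filter hm)

theorem sum_map_ite_prop {α : Type} (p : α → Prop) [DecidablePred p] (xs : List α) :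
    (xs.map (fun x => if p x then (1 : Int) else 0)).sum = (xs.countP (fun x => decide (p x)) : Int) := by
  have h : (fun x => if p x then (1 : Int) else 0)
      = (fun x => if (fun x => decide (p x)) x = true then (1 : Int) else 0) := by
    funext x; by_cases hx : p x <;> simp [hx]
  rw [h, PySem.List.sum_map_ite_one_zero]

theorem sum_map_indicator {α : Type} (q : α → Bool) (xs : List α) :
    (xs.map (fun v => if q v = true then 1 else 0)).sum = xs.countP q := by
  induction xs with
  | nil => rfl
  | cons a t ih =>
    by_cases h : q a = true <;>
      simp [h, ih, Nat.add_comm]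

-- the node -> rows fold, characterised
theorem nodeRows_getD_gen (l : List (Int × List Int)) (d : PySem.Dict Int (List Int)) (v : Int)
    (hs : ∀ p ∈ l, (p.2 : List Int).Nodup) :
    (l.foldl (fun d p => p.2.foldl (fun d w => d.modify w [] (fun x => x ++ [p.1])) d) d).getD v []
      = d.getD v [] ++ ((l.filter (fun p => p.2.contains v)).map (fun p => p.1)) := by
  induction l generalizing d with
  | nil => simp
  | cons p t ih =>
    simp only [List.foldl_cons]
    rw [ih _ (fun q hq => hs q (List.mem_cons_of_mem _ hq))]
    have hnd : (p.2 : List Int).Nodup := hs p List.mem_cons_self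
    have hinner : (p.2.foldl (fun d w => d.modify w [] (fun x => x ++ [p.1])) d).getD v []
        = d.getD v [] ++ (if p.2.contains v = true then [p.1] else []) := by
      have hfold : p.2.foldl (fun d w => d.modify w [] (fun x => x ++ [p.1])) d
          = (p.2.map (fun w => (w, p.1))).foldl (fun d q => d.modify q.1 [] (fun x => x ++ [q.2])) d := by
        rw [List.foldl_map]
      rw [hfold, PySem.Dict.getD_foldl_modify_append]
      congr 1
      rw [List.filter_map]
      have hcomp : ((fun q : Int × Int => q.1 == v) ∘ (fun w => (w, p.1))) = (fun w => w == v) := rfl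
      rw [hcomp, List.filter_beq, List.count_eq_of_nodup hnd]
      by_cases hv : v ∈ p.2
      · simp [hv]
      · simp [hv]
    rw [hinner]
    by_cases hv : v ∈ p.2
    · simp [hv, List.append_assoc]
    · simp [hv]

theorem nodeRows_getD (m : List (List Int)) (v : Int) :
    (pvNodeRows m).getD v []
      = (((PySem.List.pyRange 0 (PySem.List.len (pvRS m))).filter
          (fun a => (PySem.List.pyGetD (pvRS m) a ([] : PySem.Set Int)).contains v)).map (fun a => a)) := by
  unfold pvNodeRows
  rw [nodeRows_getD_gen]
  · rw [PySem.Dict.getD_empty, List.nil_append,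
      PySem.List.enumerate_eq_map_pyRange (pvRS m) ([] : PySem.Set Int), List.filter_map]
    rw [List.map_map]
    rfl
  · intro p hp
    have h2 : p.2 ∈ pvRS m := by
      have := PySem.List.map_snd_enumerate (pvRS m) 0
      rw [← this]
      exact List.mem_map_of_mem hp
    unfold pvRS at h2
    obtain ⟨row, _, hrow⟩ := List.mem_map.mp h2
    rw [← hrow]
    exact PySem.Set.nodup_ofList row

theorem count_nodeRows (m : List (List Int)) (v j : Int) :
    ((pvNodeRows m).getD v []).count j
      = if (0 ≤ j ∧ j < (m.length : Int))
            ∧ (PySem.List.pyGetD (pvRS m) j ([] : PySem.Set Int)).contains v = true then 1 else 0 := by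
  rw [nodeRows_getD, List.map_id', count_filter_eq]
  have hnodup := PySem.List.nodup_pyRange_one 0 (PySem.List.len (pvRS m))
  have hcr : List.count j (PySem.List.pyRange 0 (PySem.List.len (pvRS m)))
      = if j ∈ PySem.List.pyRange 0 (PySem.List.len (pvRS m)) then 1 else 0 :=
    List.count_eq_of_nodup hnodup
  have hlen : PySem.List.len (pvRS m) = (m.length : Int) := by simp [pvRS]
  have hmem : (j ∈ PySem.List.pyRange 0 (PySem.List.len (pvRS m))) ↔ (0 ≤ j ∧ j < (m.length : Int)) := by
    rw [PySem.List.mem_pyRange_one, hlen]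
  by_cases hc : (PySem.List.pyGetD (pvRS m) j ([] : PySem.Set Int)).contains v = true
  · rw [if_pos hc, hcr]
    by_cases hb : 0 ≤ j ∧ j < (m.length : Int)
    · rw [if_pos (hmem.mpr hb), if_pos ⟨hb, hc⟩]
    · rw [if_neg (fun h => hb (hmem.mp h)), if_neg (fun h => hb h.1)]
  · rw [if_neg hc, if_neg (fun h => hc h.2)]

theorem mem_L (m : List (List Int)) (i j : Int) (hj : j ∈ pvL m i) :
    i < j ∧ 0 ≤ j ∧ j < (m.length : Int) := by
  unfold pvL at hj
  obtain ⟨v, _, hjf⟩ := List.mem_flatMap.mp hj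
  have h1 := List.of_mem_filter hjf
  have h2 : j ∈ (pvNodeRows m).getD v [] := List.mem_of_mem_filter hjf
  have h3 : 0 < ((pvNodeRows m).getD v []).count j := List.count_pos_iff.mpr h2
  rw [count_nodeRows] at h3
  split at h3
  · rename_i hb
    exact ⟨by simpa using h1, hb.1.1, hb.1.2⟩
  · omega

theorem count_L (m : List (List Int)) (i j : Int) (h0 : 0 ≤ i) (hij : i < j)
    (hjn : j < (m.length : Int)) :
    (pvL m i).count j
      = (PySem.Set.inter (PySem.List.pyGetD (pvRS m) i ([] : PySem.Set Int))
          (PySem.List.pyGetD (pvRS m) j ([] : PySem.Set Int))).length := by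
  unfold pvL
  rw [List.count_flatMap]
  have hterm : ∀ v : Int,
      (List.count j ∘ fun v => ((pvNodeRows m).getD v []).filter (fun j' => decide (i < j'))) v
        = if (PySem.List.pyGetD (pvRS m) j ([] : PySem.Set Int)).contains v = true then 1 else 0 := by
    intro v
    simp only [Function.comp]
    rw [count_filter_eq]
    have hj0 : 0 ≤ j := le_of_lt (lt_of_le_of_lt h0 hij)
    rw [count_nodeRows]
    simp [hij, hj0, hjn]
  have hmap : (List.map (List.count j ∘ fun v => ((pvNodeRows m).getD v []).filter (fun j' => decide (i < j')))
        (PySem.List.pyGetD (pvRS m) i ([] : PySem.Set Int)))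
      = (PySem.List.pyGetD (pvRS m) i ([] : PySem.Set Int)).map
          (fun v => if (PySem.List.pyGetD (pvRS m) j ([] : PySem.Set Int)).contains v = true then 1 else 0) := by
    apply List.map_congr_left
    intro v _
    exact hterm v
  rw [hmap, sum_map_indicator, List.countP_eq_length_filter]
  rfl

-- per-row equality of the two shared counts
theorem shared_eq (m : List (List Int)) (i : Int) (h0 : 0 ≤ i) :
    (List.countP (fun k => decide (3 ≤ (PySem.Dict.counter (pvL m i)).getD k 0))
        (PySem.Set.ofList (pvL m i)) : Int)
      = (List.countP (fun j => decide (3 ≤ PySem.Set.len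
            (PySem.Set.inter (PySem.List.pyGetD (pvRS m) i ([] : PySem.Set Int))
              (PySem.List.pyGetD (pvRS m) j ([] : PySem.Set Int)))))
          (PySem.List.pyRange (i + 1) (PySem.List.len m)) : Int) := by
  have hlen : PySem.List.len m = (m.length : Int) := by simp
  -- the key set is a permutation of the filtered range
  have hperm : (PySem.Set.ofList (pvL m i)).Perm
      ((PySem.List.pyRange (i + 1) (PySem.List.len m)).filter (fun j => decide (j ∈ pvL m i))) := by
    rw [List.perm_ext_iff_of_nodup (PySem.Set.nodup_ofList (pvL m i))
      ((PySem.List.nodup_pyRange_one _ _).filter _)]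
    intro a
    rw [PySem.Set.mem_ofList, List.mem_filter]
    constructor
    · intro ha
      obtain ⟨hg1, hg2, hg3⟩ := mem_L m i a ha
      exact ⟨PySem.List.mem_pyRange_one.mpr ⟨by omega, by rw [hlen]; exact hg3⟩, by simpa using ha⟩
    · intro ⟨_, ha⟩
      simpa using ha
  rw [List.Perm.countP_eq _ hperm, List.countP_filter]
  congr 1
  apply List.countP_congr
  intro j hj
  obtain ⟨hj1, hj2⟩ := PySem.List.mem_pyRange_one.mp hj
  rw [hlen] at hj2
  have hij : i < j := by omega
  have hcnt := count_L m i j h0 hij hj2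
  have hGD : (PySem.Dict.counter (pvL m i)).getD j 0 = ((pvL m i).count j : Int) :=
    PySem.Dict.getD_counter _ _
  constructor
  · intro h
    simp only [Bool.and_eq_true, decide_eq_true_eq] at h
    obtain ⟨h1, _⟩ := h
    rw [hGD, hcnt] at h1
    simpa [PySem.Set.len] using h1
  · intro h
    simp only [decide_eq_true_eq, PySem.Set.len] at h
    have h3 : (3 : Nat) ≤ (pvL m i).count j := by rw [hcnt]; exact_mod_cast h
    have hmem : j ∈ pvL m i := List.count_pos_iff.mp (by omega)
    simp only [Bool.and_eq_true, decide_eq_true_eq]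
    refine ⟨?_, by simpa using hmem⟩
    rw [hGD, hcnt]
    exact_mod_cast h

-- ===== VERDICT (by name: the statement is the Claim_ definition above) =====
theorem connectivity_check_consitency_spec : Claim_equal_connectivity_check_consitency := by
  intro m _
  unfold Spec_connectivity_check_consitency
  unfold connectivity_check_consitency connectivity_check_consitency_alt
  simp only []
  apply Eq.symm
  apply PySem.List.foldl_congr_mem
  intro acc i hi
  obtain ⟨h0, _⟩ := PySem.List.mem_pyRange_one.mp hi
  -- reduce B's branch
  have hB : ((m.map (fun row => PySem.Set.ofList row)) : List (PySem.Set Int)) = pvRS m := rfl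
  -- B's cnt is the counter of pvL m i
  have hcnt :
      ((PySem.List.pyGetD (pvRS m) i ([] : PySem.Set Int)).foldl
        (fun c v =>
          (((PySem.List.enumerate (pvRS m)).foldl
              (fun d p => p.2.foldl (fun d v => d.modify v [] (fun l => l ++ [p.1])) d)
              PySem.Dict.empty).getD v []).foldl
            (fun c j => if i < j then c.modify j 0 (fun x => x + 1) else c) c)
        PySem.Dict.empty)
      = PySem.Dict.counter (pvL m i) := by
    have hstep : ∀ (c : PySem.Dict Int Int) (v : Int),
        (((pvNodeRows m).getD v []).foldl
            (fun c j => if i < j then c.modify j 0 (fun x => x + 1) else c) c)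
          = ((((pvNodeRows m).getD v []).filter (fun j => decide (i < j))).foldl
              (fun c j => c.modify j 0 (fun x => x + 1)) c) := by
      intro c v
      exact PySem.List.foldl_ite_eq_foldl_filter (fun j => i < j) _ _ c
    calc ((PySem.List.pyGetD (pvRS m) i ([] : PySem.Set Int)).foldl
          (fun c v =>
            (((PySem.List.enumerate (pvRS m)).foldl
                (fun d p => p.2.foldl (fun d v => d.modify v [] (fun l => l ++ [p.1])) d)
                PySem.Dict.empty).getD v []).foldl
              (fun c j => if i < j then c.modify j 0 (fun x => x + 1) else c) c)
          PySem.Dict.empty)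
        = ((PySem.List.pyGetD (pvRS m) i ([] : PySem.Set Int)).foldl
            (fun c v =>
              ((((pvNodeRows m).getD v []).filter (fun j => decide (i < j))).foldl
                (fun c j => c.modify j 0 (fun x => x + 1)) c))
            (PySem.Dict.empty : PySem.Dict Int Int)) := by
          apply PySem.List.foldl_congr_mem
          intro c v _
          exact hstep c v
      _ = ((pvL m i).foldl (fun c j => c.modify j 0 (fun x => x + 1)) (PySem.Dict.empty : PySem.Dict Int Int)) := by
          rw [foldl_foldl_flatMap]
          rfl
      _ = PySem.Dict.counter (pvL m i) := (PySem.Dict.counter_eq_foldl (pvL m i)).symm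
  rw [hB, hcnt]
  -- B's shared
  have hvals : (PySem.Dict.counter (pvL m i)).values
      = ((PySem.Dict.counter (pvL m i)).keys).map (fun k => (PySem.Dict.counter (pvL m i)).getD k 0) :=
    PySem.Dict.values_eq_map_keys _ (PySem.Dict.nodup_keys_counter _) 0
  rw [hvals, List.map_map, PySem.Dict.keys_counter]
  have hsum : ((PySem.Set.ofList (pvL m i)).map
        ((fun c => if 3 ≤ c then (1 : Int) else 0) ∘ fun k => (PySem.Dict.counter (pvL m i)).getD k 0)).sum
      = ((PySem.Set.ofList (pvL m i)).countP
          (fun k => decide (3 ≤ (PySem.Dict.counter (pvL m i)).getD k 0)) : Int) := by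
    exact sum_map_ite_prop (fun k => 3 ≤ (PySem.Dict.counter (pvL m i)).getD k 0) _
  rw [hsum]
  -- A's shared
  rw [PySem.List.foldl_ite_add_one
    (fun j => 3 ≤ PySem.Set.len (PySem.Set.inter (PySem.List.pyGetD (pvRS m) i ([] : PySem.Set Int))
      (PySem.List.pyGetD (pvRS m) j ([] : PySem.Set Int))))]
  rw [shared_eq m i h0]
  simp
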